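-- pv_equiv track=rewrite | github.com/benbendaisy/CommunicationCodes | python_module/examples/1349_Maximum_Students_Taking_Exam.py | maxStudents1
-- ===== SOURCE A (Python) =====
-- from typing import List
--
-- def maxStudents1(seats: List[List[str]]) -> int:
--     m, n = len(seats), len(seats[0])
--     valid_rows = []
--
--     for row in seats:
--         mask = 0
--         for j in range(n):
--             if row[j] == '.':
--                 mask |= (1 << j)
--         valid_rows.append(mask)
--
--     memo = {}
--
--     def count_bits(x):
--         return bin(x).count('1')
--
--     def valid(mask):
--         return (mask & (mask >> 1)) == 0
--
--     def dfs(idx, prev_mask):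
--         if idx == m:
--             return 0
--         if (idx, prev_mask) in memo:
--             return memo[(idx, prev_mask)]
--
--         res = 0
--         row_mask = valid_rows[idx]
--
--         mask = row_mask
--         while mask >= 0:
--             if (mask & row_mask) == mask and valid(mask):
--                 if ((mask << 1) & prev_mask) == 0 and ((mask >> 1) & prev_mask) == 0:
--                     res = max(res, count_bits(mask) + dfs(idx + 1, mask))
--
--             if mask == 0:
--                 break
--             mask = (mask - 1) & row_mask
--
--         memo[(idx, prev_mask)] = res
--         return res
--
--     return dfs(0, 0)
-- ===== SOURCE B (Python) =====
-- def maxStudents1(seats):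
--     m, n = len(seats), len(seats[0])
--     masks = []
--     for row in seats:
--         mask = 0
--         for j in range(n):
--             if row[j] == '.':
--                 mask |= (1 << j)
--         masks.append(mask)
--
--     # Backward iterative DP, no recursion and no memo table: after processing the
--     # suffix of rows starting at row i, vals maps each admissible mask mk of row i
--     # to popcount(mk) + best total for the rows below given row i seated as mk.
--     vals = {}
--     for r in reversed(masks):
--         nvals = {}
--         for mk in range(r + 1):
--             if mk & r == mk and mk & (mk >> 1) == 0:
--                 best = 0
--                 for p, v in vals.items():
--                     if (mk << 1) & p == 0 and (mk >> 1) & p == 0 and v > best: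
--                         best = v
--                 nvals[mk] = bin(mk).count('1') + best
--         vals = nvals
--     ans = 0
--     for v in vals.values():
--         if v > ans:
--             ans = v
--     return ans
-- ===== Notes on version B (the rewrite author's own statement) =====
-- stated objective: alternative
-- what changed: A's memoized top-down recursion over (row index, previous-row mask) states with a descending-submask inner loop is replaced by an iterative bottom-up row-by-row DP that sweeps the rows backwards keeping one dictionary from each admissible mask of the current row to the best achievable suffix total.
import Mathlib
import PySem

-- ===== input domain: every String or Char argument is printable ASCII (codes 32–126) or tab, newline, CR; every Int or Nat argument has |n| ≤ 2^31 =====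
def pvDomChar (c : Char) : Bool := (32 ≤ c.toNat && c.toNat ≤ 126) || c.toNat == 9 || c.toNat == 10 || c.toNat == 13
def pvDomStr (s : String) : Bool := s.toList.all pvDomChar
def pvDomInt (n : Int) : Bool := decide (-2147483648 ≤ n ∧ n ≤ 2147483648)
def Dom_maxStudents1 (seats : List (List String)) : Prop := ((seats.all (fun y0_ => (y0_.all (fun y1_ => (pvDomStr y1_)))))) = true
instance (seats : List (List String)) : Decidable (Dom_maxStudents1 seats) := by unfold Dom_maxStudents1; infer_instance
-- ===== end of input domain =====

-- B replaces A's memoized top-down DFS over (row, previous-mask) states by an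
-- iterative backward row-by-row DP that keeps one dictionary mapping each
-- admissible mask of the current row to the best suffix total; objective: alternative.

-- ===== PORT A =====

-- row mask:  for j in range(n): if row[j] == '.': mask |= (1 << j)
def pvRowMaskA (n : Int) (row : List String) : Int :=
  (PySem.List.pyRange 0 n 1).foldl
    (fun mask j =>
      if PySem.List.pyGetD row j "" == "." then PySem.Int.bor mask ((1 : Int) <<< j.toNat)
      else mask) 0

-- dfs/while-loop pair of A, with the memo dict threaded through.  The Nat `fuel`
-- (recursion depth) and `lfuel` (inner while-loop steps) arguments only make the
-- recursion structural; at the call sites below they are large enough that they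
-- never run out (dfs recurses at most m deep, the submask chain from `mask` has
-- at most mask+1 elements).
mutual
def pvDfsA (fuel : Nat) (vr : List Int) (m idx prev : Int)
    (memo : PySem.Dict (Int × Int) Int) : Int × PySem.Dict (Int × Int) Int :=
  if idx == m then (0, memo)
  else
    match fuel with
    | 0 => (0, memo)
    | fuel' + 1 =>
      match memo.get? (idx, prev) with
      | some v => (v, memo)
      | none =>
        let rowMask := PySem.List.pyGetD vr idx 0
        let r := pvLoopA fuel' (rowMask.toNat + 1) vr m idx prev rowMask rowMask 0 memo
        (r.1, r.2.insert (idx, prev) r.1)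
termination_by (fuel, 0)
decreasing_by · exact Prod.Lex.left _ _ (by omega)

def pvLoopA (fuel lfuel : Nat) (vr : List Int) (m idx prev rowMask mask res : Int)
    (memo : PySem.Dict (Int × Int) Int) : Int × PySem.Dict (Int × Int) Int :=
  match lfuel with
  | 0 => (res, memo)
  | lfuel' + 1 =>
    if mask < 0 then (res, memo)    -- while mask >= 0
    else
      let r :=
        if PySem.Int.band mask rowMask == mask
            && PySem.Int.band mask (mask >>> (1 : Nat)) == 0 then
          if PySem.Int.band (mask <<< (1 : Nat)) prev == 0
              && PySem.Int.band (mask >>> (1 : Nat)) prev == 0 then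
            let s := pvDfsA fuel vr m (idx + 1) mask memo
            (max res (((PySem.Int.bitCount mask : Nat) : Int) + s.1), s.2)
          else (res, memo)
        else (res, memo)
      if mask == 0 then r
      else pvLoopA fuel lfuel' vr m idx prev rowMask (PySem.Int.band (mask - 1) rowMask) r.1 r.2
termination_by (fuel, lfuel)
decreasing_by
  · exact Prod.Lex.right _ (by omega)
  · exact Prod.Lex.right _ (by omega)
end

def maxStudents1 (seats : List (List String)) : Int :=
  let m : Int := seats.length
  let n : Int := (seats.headD []).length        -- len(seats[0]); seats ≠ [] under Pre_
  let validRows : List Int :=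
    seats.foldl (fun acc row => acc ++ [pvRowMaskA n row]) []
  (pvDfsA (m.toNat + 1) validRows m 0 0 PySem.Dict.empty).1

-- ===== PORT B =====

-- identical inner row-mask loop (shared preamble of both Pythons)
def pvRowMaskB (n : Int) (row : List String) : Int :=
  (PySem.List.pyRange 0 n 1).foldl
    (fun mask j =>
      if PySem.List.pyGetD row j "" == "." then PySem.Int.bor mask ((1 : Int) <<< j.toNat)
      else mask) 0

-- best = max over already-computed suffix dict entries compatible with mk
def pvBestB (vals : PySem.Dict Int Int) (mk : Int) : Int :=
  vals.items.foldl
    (fun best pv =>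
      if PySem.Int.band (mk <<< (1 : Nat)) pv.1 == 0
          && PySem.Int.band (mk >>> (1 : Nat)) pv.1 == 0
          && best < pv.2 then pv.2
      else best) 0

-- one backward step: rebuild the dict for the row with mask r on top of suffix dict vals
def pvStepB (vals : PySem.Dict Int Int) (r : Int) : PySem.Dict Int Int :=
  (PySem.List.pyRange 0 (r + 1) 1).foldl
    (fun nvals mk =>
      if PySem.Int.band mk r == mk && PySem.Int.band mk (mk >>> (1 : Nat)) == 0 then
        nvals.insert mk (((PySem.Int.bitCount mk : Nat) : Int) + pvBestB vals mk)
      else nvals) PySem.Dict.empty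

def maxStudents1_alt (seats : List (List String)) : Int :=
  let n : Int := (seats.headD []).length        -- len(seats[0]); seats ≠ [] under Pre_
  let masks : List Int :=
    seats.foldl (fun acc row => acc ++ [pvRowMaskB n row]) []
  let vals := masks.reverse.foldl pvStepB PySem.Dict.empty
  vals.values.foldl (fun ans v => if ans < v then v else ans) 0

-- ===== PRECONDITION & SPEC =====

-- Pre_ excludes exactly the inputs on which the Python A raises IndexError:
-- empty seats (seats[0]) and a row shorter than the first row (row[j], j < n).
def Pre_maxStudents1 (seats : List (List String)) : Prop :=
  seats ≠ [] ∧ ∀ row ∈ seats, (seats.headD []).length ≤ row.length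
instance (seats : List (List String)) : Decidable (Pre_maxStudents1 seats) := by
  unfold Pre_maxStudents1; infer_instance

def pvWitness_maxStudents1 : List (List String) := [[".", "#"], [".", "."]]

def Spec_maxStudents1 (seats : List (List String)) (out : Int) : Prop := out = maxStudents1_alt seats
instance (seats : List (List String)) (out : Int) : Decidable (Spec_maxStudents1 seats out) := by
  unfold Spec_maxStudents1; infer_instance

-- ===== CLAIM (what is proved, stated in full; the proofs are below) =====
def Claim_equal_maxStudents1 : Prop := ∀ (seats : List (List String)), Dom_maxStudents1 seats → Pre_maxStudents1 seats → Spec_maxStudents1 seats (maxStudents1 seats)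

-- ===== LEMMAS AND PROOFS =====

-- ---- Nat bit toolbox ----

theorem pvLandMod (a b : Nat) : (a &&& b) % 2 = 1 ↔ (a % 2 = 1 ∧ b % 2 = 1) := by
  have := Nat.testBit_land a b 0
  simp only [Nat.testBit_zero] at this
  rw [← Bool.decide_and] at this
  exact decide_eq_decide.mp this

-- the (mask - 1) & row step of A's while loop reaches the next smaller submask:
-- no submask lies strictly between b and (b-1) & r
theorem pvSubmaskStep : ∀ b m r : Nat, b &&& r = b → m &&& r = m → m < b → m ≤ (b - 1) &&& r := by
  intro b
  induction b using Nat.strong_induction_on with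
  | _ b IH =>
    intro m r hb hm hlt
    have hbd : (b &&& r) / 2 = b / 2 &&& r / 2 := Nat.and_div_two
    have hmd : (m &&& r) / 2 = m / 2 &&& r / 2 := Nat.and_div_two
    have hb2 : b / 2 &&& r / 2 = b / 2 := by omega
    have hm2 : m / 2 &&& r / 2 = m / 2 := by omega
    have hbm := pvLandMod b r
    have hmm := pvLandMod m r
    rcases Nat.even_or_odd b with hbe | hbo
    <;> [rw [Nat.even_iff] at hbe; rw [Nat.odd_iff] at hbo]
    · have h1d : (b - 1) / 2 = b / 2 - 1 := by omega
      have hdec : ((b-1) &&& r) = 2 * (((b-1)/2) &&& (r/2)) + ((b-1)&&&r) % 2 := by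
        have := @Nat.and_div_two (b-1) r; omega
      have hmod1 := pvLandMod (b-1) r
      have hm2lt : m / 2 < b / 2 := by omega
      have := IH (b/2) (by omega) (m/2) (r/2) hb2 hm2 hm2lt
      rw [h1d] at hdec
      omega
    · have h1d : (b - 1) / 2 = b / 2 := by omega
      have hdec : ((b-1) &&& r) = 2 * (((b-1)/2) &&& (r/2)) + ((b-1)&&&r) % 2 := by
        have := @Nat.and_div_two (b-1) r; omega
      have hmod1 := pvLandMod (b-1) r
      rw [h1d, hb2] at hdec
      omega

-- the descending submask chain of A's while loop, on Nat
def pvChain (r : Nat) (s : Nat) : List Nat :=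
  if _ : s = 0 then [s] else s :: pvChain r ((s - 1) &&& r)
termination_by s
decreasing_by
  have : (s - 1) &&& r ≤ s - 1 := Nat.and_le_left
  omega

theorem pvChain_complete : ∀ s m r : Nat, m &&& r = m → s &&& r = s → m ≤ s → m ∈ pvChain r s := by
  intro s
  induction s using Nat.strong_induction_on with
  | _ s IH =>
    intro m r hm hs hle
    rw [pvChain]
    by_cases h0 : s = 0
    · simp [h0]; omega
    · simp [h0]
      rcases eq_or_lt_of_le hle with he | hlt
      · left; omega
      · right
        have hstep := pvSubmaskStep s m r hs hm hlt
        have hsub : ((s-1) &&& r) &&& r = (s-1) &&& r := by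
          rw [Nat.land_assoc, Nat.and_self]
        have hlt' : (s - 1) &&& r < s := by
          have : (s - 1) &&& r ≤ s - 1 := Nat.and_le_left
          omega
        exact IH _ hlt' m r hm hsub hstep

theorem pvLandZeroIff (x y : Nat) : x &&& y = 0 ↔ ∀ i, ¬(x.testBit i ∧ y.testBit i) := by
  constructor
  · intro h i ⟨hx, hy⟩
    have := Nat.testBit_land x y i
    rw [h, hx, hy] at this
    simp [Nat.zero_testBit] at this
  · intro h
    apply Nat.eq_of_testBit_eq
    intro i
    rw [Nat.testBit_land, Nat.zero_testBit]
    have := h i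
    cases hx : x.testBit i <;> cases hy : y.testBit i <;> simp_all

theorem pvShiftlLandZero (a b : Nat) : (a <<< 1) &&& b = 0 ↔ ∀ i, ¬(a.testBit i ∧ b.testBit (i+1)) := by
  rw [pvLandZeroIff]
  constructor
  · intro h i hi
    exact h (i+1) ⟨by rw [Nat.testBit_shiftLeft]; simpa using hi.1, hi.2⟩
  · intro h i hi
    rw [Nat.testBit_shiftLeft] at hi
    rcases i with _ | k
    · simp at hi
    · exact h k ⟨by simpa using hi.1, hi.2⟩

theorem pvShiftrLandZero (a b : Nat) : (a >>> 1) &&& b = 0 ↔ ∀ i, ¬(a.testBit (i+1) ∧ b.testBit i) := by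
  rw [pvLandZeroIff]
  constructor
  · intro h i hi
    exact h i (by simpa [Nat.testBit_shiftRight, Nat.add_comm] using hi)
  · intro h i hi
    exact h i (by simpa [Nat.testBit_shiftRight, Nat.add_comm] using hi)

-- ---- Int-level abbreviations for the shared mask predicates ----

def pvPC (x : Int) : Int := ((PySem.Int.bitCount x : Nat) : Int)

def pvOk (r mk : Int) : Bool :=
  PySem.Int.band mk r == mk && PySem.Int.band mk (mk >>> (1 : Nat)) == 0

def pvCompat (a p : Int) : Bool :=
  PySem.Int.band (a <<< (1 : Nat)) p == 0 && PySem.Int.band (a >>> (1 : Nat)) p == 0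

theorem pvShiftLcast (A : Nat) : ((A : Int)) <<< (1 : Nat) = ((A <<< 1 : Nat) : Int) := by
  push_cast [Int.shiftLeft_eq, Nat.shiftLeft_eq]; ring

theorem pvShiftRcast (A : Nat) : ((A : Int)) >>> (1 : Nat) = ((A >>> 1 : Nat) : Int) :=
  (Int.natCast_shiftRight A 1).symm

theorem pvCompat_natCast (A B : Nat) :
    pvCompat (A : Int) (B : Int) = (decide ((A <<< 1) &&& B = 0) && decide ((A >>> 1) &&& B = 0)) := by
  unfold pvCompat
  rw [pvShiftLcast, pvShiftRcast, PySem.Int.band_natCast, PySem.Int.band_natCast,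
    Bool.eq_iff_iff]
  simp

-- adjacency compatibility between two row masks is symmetric
theorem pvCompat_symm (a b : Int) (ha : 0 ≤ a) (hb : 0 ≤ b) : pvCompat a b = pvCompat b a := by
  obtain ⟨A, rfl⟩ : ∃ A : Nat, a = (A : Int) := ⟨a.toNat, (Int.toNat_of_nonneg ha).symm⟩
  obtain ⟨B, rfl⟩ : ∃ B : Nat, b = (B : Int) := ⟨b.toNat, (Int.toNat_of_nonneg hb).symm⟩
  rw [pvCompat_natCast, pvCompat_natCast, Bool.eq_iff_iff]
  simp only [Bool.and_eq_true, decide_eq_true_eq]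
  rw [pvShiftlLandZero, pvShiftrLandZero, pvShiftlLandZero, pvShiftrLandZero]
  constructor
  · intro ⟨p, q⟩; exact ⟨fun i hi => q i ⟨hi.2, hi.1⟩, fun i hi => p i ⟨hi.2, hi.1⟩⟩
  · intro ⟨p, q⟩; exact ⟨fun i hi => q i ⟨hi.2, hi.1⟩, fun i hi => p i ⟨hi.2, hi.1⟩⟩

-- ---- the common mathematical value: best seating of the remaining rows ----

def pvG : List Int → Int → Int
  | [], _ => 0
  | r :: rest, prev =>
    (((PySem.List.pyRange 0 (r + 1) 1).filter (fun mk => pvOk r mk && pvCompat mk prev)).map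
      (fun mk => pvPC mk + pvG rest mk)).foldl max 0

-- ---- fold-max utilities ----

theorem pvFoldMax_le (L : List Int) (a b : Int) (h : ∀ x ∈ L, x ≤ b) (hab : a ≤ b) :
    L.foldl max a ≤ b := by
  rcases PySem.List.foldl_max_mem L a with hm | hm
  · omega
  · exact h _ hm

theorem pvFoldMax_congr_mem (L1 L2 : List Int) (a : Int) (h : ∀ x, x ∈ L1 ↔ x ∈ L2) :
    L1.foldl max a = L2.foldl max a := by
  apply le_antisymm
  · exact pvFoldMax_le _ _ _ (fun x hx => (PySem.List.le_foldl_max L2 a).2 x ((h x).mp hx))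
      (PySem.List.le_foldl_max L2 a).1
  · exact pvFoldMax_le _ _ _ (fun x hx => (PySem.List.le_foldl_max L1 a).2 x ((h x).mpr hx))
      (PySem.List.le_foldl_max L1 a).1

-- ---- A side: the memoized dfs computes pvG ----

def pvMemoOK (vr : List Int) (memo : PySem.Dict (Int × Int) Int) : Prop :=
  ∀ i p v, memo.get? (i, p) = some v → v = pvG (vr.drop i.toNat) p

theorem pvLoop_ok (fuel : Nat) (vr : List Int) (idx prev rowMask : Int)
    (hrm : 0 ≤ rowMask)
    (hdfs : ∀ prev' memo', pvMemoOK vr memo' →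
      (pvDfsA fuel vr vr.length (idx + 1) prev' memo').1 = pvG (vr.drop (idx.toNat + 1)) prev' ∧
      pvMemoOK vr (pvDfsA fuel vr vr.length (idx + 1) prev' memo').2) :
    ∀ lfuel (mask res : Int) memo, 0 ≤ mask → mask.toNat < lfuel → pvMemoOK vr memo →
    (pvLoopA fuel lfuel vr vr.length idx prev rowMask mask res memo).1
      = ((((pvChain rowMask.toNat mask.toNat).map (fun k : Nat => (k : Int))).filter
            (fun mk => pvOk rowMask mk && pvCompat mk prev)).map
          (fun mk => pvPC mk + pvG (vr.drop (idx.toNat + 1)) mk)).foldl max res ∧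
    pvMemoOK vr (pvLoopA fuel lfuel vr vr.length idx prev rowMask mask res memo).2 := by
  intro lfuel
  induction lfuel with
  | zero => intro mask res memo _ hlf _; omega
  | succ l ih =>
    intro mask res memo hm0 hlf hmemo
    have hcast : ((mask.toNat : Int)) = mask := Int.toNat_of_nonneg hm0
    rw [pvLoopA]
    rw [if_neg (by omega)]
    -- the body of the iteration: value and memo after the conditional dfs call
    set dres := pvDfsA fuel vr (↑vr.length) (idx + 1) mask memo with hdres
    obtain ⟨hd1, hd2⟩ := hdfs mask memo hmemo
    rw [← hdres] at hd1 hd2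
    by_cases hz : mask = 0
    · -- last chain element
      rw [if_pos (by simp [hz])]
      subst hz
      rw [show (0 : Int).toNat = 0 from rfl] at *
      rw [pvChain, dif_pos rfl]
      simp only [List.map_cons, List.map_nil, Int.natCast_zero]
      simp only [List.filter_cons, List.filter_nil]
      by_cases c1 : (PySem.Int.band 0 rowMask == 0 && PySem.Int.band 0 ((0:Int) >>> (1:Nat)) == 0) = true
      · by_cases c2 : (PySem.Int.band ((0:Int) <<< (1:Nat)) prev == 0 && PySem.Int.band ((0:Int) >>> (1:Nat)) prev == 0) = true
        · rw [if_pos c1, if_pos c2]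
          rw [if_pos (by simp only [pvOk, pvCompat]; rw [c1, c2]; rfl)]
          simp only [List.map_cons, List.map_nil, List.foldl_cons, List.foldl_nil]
          constructor
          · simp only [pvPC, hd1]
          · exact hd2
        · rw [if_pos c1, if_neg c2]
          rw [if_neg (by simp only [pvOk, pvCompat]; rw [c1]; simpa using c2)]
          exact ⟨rfl, hmemo⟩
      · rw [if_neg c1]
        rw [if_neg (by simp only [pvOk, pvCompat]; rw [Bool.and_eq_true]; intro h; exact c1 h.1)]
        exact ⟨rfl, hmemo⟩
    · -- chain step
      have hm1 : 1 ≤ mask := by omega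
      rw [if_neg (by simpa using hz)]
      have hnext : PySem.Int.band (mask - 1) rowMask = ((((mask.toNat - 1) &&& rowMask.toNat : Nat)) : Int) := by
        rw [PySem.Int.band_of_nonneg (by omega) hrm]
        congr 2
        omega
      have hnn : 0 ≤ PySem.Int.band (mask - 1) rowMask := by rw [hnext]; positivity
      have hlt : (PySem.Int.band (mask - 1) rowMask).toNat < l := by
        rw [hnext]
        have : (mask.toNat - 1) &&& rowMask.toNat ≤ mask.toNat - 1 := Nat.and_le_left
        omega
      rw [pvChain, dif_neg (by omega)]
      simp only [List.map_cons, hcast]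
      simp only [List.filter_cons]
      -- head condition of the chain filter equals the port's two tests
      by_cases c1 : (PySem.Int.band mask rowMask == mask && PySem.Int.band mask (mask >>> (1:Nat)) == 0) = true
      · by_cases c2 : (PySem.Int.band (mask <<< (1:Nat)) prev == 0 && PySem.Int.band (mask >>> (1:Nat)) prev == 0) = true
        · rw [if_pos c1, if_pos c2]
          rw [if_pos (by simp only [pvOk, pvCompat]; rw [c1, c2]; rfl)]
          simp only [List.map_cons, List.foldl_cons]
          obtain ⟨h1, h2⟩ := ih (PySem.Int.band (mask - 1) rowMask) (max res (((PySem.Int.bitCount mask : Nat) : Int) + dres.1)) dres.2 hnn (by omega) hd2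
          rw [hnext] at h1 h2
          rw [hnext]
          refine ⟨h1.trans ?_, h2⟩
          congr 1
          simp only [pvPC]
          rw [hd1]
        · rw [if_pos c1, if_neg c2]
          rw [if_neg (by simp only [pvOk, pvCompat]; rw [c1]; simpa using c2)]
          obtain ⟨h1, h2⟩ := ih (PySem.Int.band (mask - 1) rowMask) res memo hnn (by omega) hmemo
          rw [hnext] at h1 h2
          rw [hnext]
          exact ⟨h1, h2⟩
      · rw [if_neg c1]
        rw [if_neg (by simp only [pvOk, pvCompat]; rw [Bool.and_eq_true]; intro h; exact c1 h.1)]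
        obtain ⟨h1, h2⟩ := ih (PySem.Int.band (mask - 1) rowMask) res memo hnn (by omega) hmemo
        rw [hnext] at h1 h2
        rw [hnext]
        exact ⟨h1, h2⟩

theorem pvOk_sub (rowMask mk : Int) (hrm : 0 ≤ rowMask) (hmk : 0 ≤ mk)
    (h : pvOk rowMask mk = true) : mk.toNat &&& rowMask.toNat = mk.toNat ∧ mk ≤ rowMask := by
  unfold pvOk at h
  rw [Bool.and_eq_true] at h
  have h1 : PySem.Int.band mk rowMask = mk := by
    have := h.1; rwa [beq_iff_eq] at this
  rw [PySem.Int.band_of_nonneg hmk hrm] at h1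
  have h2 : mk.toNat &&& rowMask.toNat = mk.toNat := by omega
  have h3 : mk.toNat &&& rowMask.toNat ≤ rowMask.toNat := Nat.and_le_right
  exact ⟨h2, by omega⟩

-- A's descending-submask while loop visits every admissible mask of range(row+1)
theorem pvChainRange (rest : List Int) (prev rowMask : Int) (hrm : 0 ≤ rowMask) :
    ((((pvChain rowMask.toNat rowMask.toNat).map (fun k : Nat => (k : Int))).filter
        (fun mk => pvOk rowMask mk && pvCompat mk prev)).map
      (fun mk => pvPC mk + pvG rest mk)).foldl max 0
    = pvG (rowMask :: rest) prev := by
  simp only [pvG]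
  apply pvFoldMax_congr_mem
  intro x
  constructor
  · intro hx
    obtain ⟨mk, hmk, hxeq⟩ := List.mem_map.mp hx
    obtain ⟨hmem, hpred⟩ := List.mem_filter.mp hmk
    obtain ⟨k, hk, hkeq⟩ := List.mem_map.mp hmem
    have hmk0 : 0 ≤ mk := by omega
    have hle := (pvOk_sub rowMask mk hrm hmk0 (Bool.and_elim_left hpred)).2
    refine List.mem_map.mpr ⟨mk, List.mem_filter.mpr ⟨?_, hpred⟩, hxeq⟩
    exact PySem.List.mem_pyRange_one.mpr ⟨hmk0, by omega⟩
  · intro hx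
    obtain ⟨mk, hmk, hxeq⟩ := List.mem_map.mp hx
    obtain ⟨hmem, hpred⟩ := List.mem_filter.mp hmk
    have hr := PySem.List.mem_pyRange_one.mp hmem
    have hmk0 : 0 ≤ mk := hr.1
    obtain ⟨hsub, _⟩ := pvOk_sub rowMask mk hrm hmk0 (Bool.and_elim_left hpred)
    have hchain : mk.toNat ∈ pvChain rowMask.toNat rowMask.toNat :=
      pvChain_complete rowMask.toNat mk.toNat rowMask.toNat hsub (Nat.and_self _) (by omega)
    refine List.mem_map.mpr ⟨mk, List.mem_filter.mpr ⟨?_, hpred⟩, hxeq⟩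
    refine List.mem_map.mpr ⟨mk.toNat, hchain, ?_⟩
    omega

theorem pvDfs_ok : ∀ fuel (vr : List Int) (idx prev : Int) memo,
    (∀ x ∈ vr, 0 ≤ x) → 0 ≤ idx → idx.toNat ≤ vr.length → vr.length ≤ idx.toNat + fuel →
    pvMemoOK vr memo →
    (pvDfsA fuel vr vr.length idx prev memo).1 = pvG (vr.drop idx.toNat) prev ∧
    pvMemoOK vr (pvDfsA fuel vr vr.length idx prev memo).2 := by
  intro fuel
  induction fuel with
  | zero =>
    intro vr idx prev memo hvr hidx hle hfuel hmemo
    have heq : idx = (vr.length : Int) := by omega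
    rw [pvDfsA, if_pos (by simpa using heq)]
    refine ⟨?_, hmemo⟩
    have : idx.toNat = vr.length := by omega
    rw [this, List.drop_length]
    rfl
  | succ f ihf =>
    intro vr idx prev memo hvr hidx hle hfuel hmemo
    rw [pvDfsA]
    by_cases hend : idx = (vr.length : Int)
    · rw [if_pos (by simpa using hend)]
      refine ⟨?_, hmemo⟩
      have : idx.toNat = vr.length := by omega
      rw [this, List.drop_length]
      rfl
    · rw [if_neg (by simpa using hend)]
      have hlt : idx.toNat < vr.length := by omega
      cases hget : memo.get? (idx, prev) with
      | some v => exact ⟨hmemo idx prev v hget, hmemo⟩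
      | none =>
        have hrowe : PySem.List.pyGetD vr idx 0 = vr[idx.toNat] :=
          PySem.List.pyGetD_eq_getElem vr 0 hidx (by omega)
        have hrm : 0 ≤ PySem.List.pyGetD vr idx 0 := by
          rw [hrowe]; exact hvr _ (List.getElem_mem _)
        have hdfs : ∀ prev' memo', pvMemoOK vr memo' →
            (pvDfsA f vr vr.length (idx + 1) prev' memo').1 = pvG (vr.drop (idx.toNat + 1)) prev' ∧
            pvMemoOK vr (pvDfsA f vr vr.length (idx + 1) prev' memo').2 := by
          intro prev' memo' hm'
          have h := ihf vr (idx + 1) prev' memo' hvr (by omega) (by omega) (by omega) hm'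
          rwa [show (idx + 1).toNat = idx.toNat + 1 by omega] at h
        obtain ⟨hl1, hl2⟩ := pvLoop_ok f vr idx prev (PySem.List.pyGetD vr idx 0) hrm hdfs
          ((PySem.List.pyGetD vr idx 0).toNat + 1) (PySem.List.pyGetD vr idx 0) 0 memo hrm
          (by omega) hmemo
        have hval : (pvLoopA f ((PySem.List.pyGetD vr idx 0).toNat + 1) vr (↑vr.length) idx prev
            (PySem.List.pyGetD vr idx 0) (PySem.List.pyGetD vr idx 0) 0 memo).1
            = pvG (vr.drop idx.toNat) prev := by
          rw [hl1, pvChainRange (vr.drop (idx.toNat + 1)) prev _ hrm]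
          rw [List.drop_eq_getElem_cons hlt, ← hrowe]
        refine ⟨hval, ?_⟩
        intro i p v hv
        rw [PySem.Dict.get?_insert] at hv
        split at hv
        · rename_i hkey
          obtain ⟨hi, hp⟩ := Prod.mk.injEq .. ▸ hkey
          injection hv with hv'
          subst hi hp
          rw [← hv']
          exact hval
        · exact hl2 i p v hv

-- ---- B side: the backward dictionary DP computes pvG ----

def pvValsSpec : List Int → List (Int × Int)
  | [] => []
  | r :: rest =>
    ((PySem.List.pyRange 0 (r + 1) 1).filter (fun mk => pvOk r mk)).map
      (fun mk => (mk, pvPC mk + pvG rest mk))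

theorem pvStep_items (vals : PySem.Dict Int Int) (r : Int) :
    (pvStepB vals r).items
      = ((PySem.List.pyRange 0 (r + 1) 1).filter (fun mk => pvOk r mk)).map
          (fun mk => (mk, pvPC mk + pvBestB vals mk)) := by
  unfold pvStepB pvOk pvPC
  have h1 : (PySem.List.pyRange 0 (r + 1) 1).foldl
      (fun nvals mk =>
        if PySem.Int.band mk r == mk && PySem.Int.band mk (mk >>> (1 : Nat)) == 0 then
          nvals.insert mk (((PySem.Int.bitCount mk : Nat) : Int) + pvBestB vals mk)
        else nvals) PySem.Dict.empty
      = ((PySem.List.pyRange 0 (r + 1) 1).filter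
          (fun mk => PySem.Int.band mk r == mk && PySem.Int.band mk (mk >>> (1 : Nat)) == 0)).foldl
        (fun nvals mk => nvals.insert mk (((PySem.Int.bitCount mk : Nat) : Int) + pvBestB vals mk))
        PySem.Dict.empty :=
    PySem.List.foldl_if_eq_foldl_filter _ _ _ _
  rw [h1]
  have h2 := PySem.Dict.items_foldl_insert_fresh
      ((PySem.List.pyRange 0 (r + 1) 1).filter
        (fun mk => PySem.Int.band mk r == mk && PySem.Int.band mk (mk >>> (1 : Nat)) == 0))
      (fun mk => mk)
      (fun mk => ((PySem.Int.bitCount mk : Nat) : Int) + pvBestB vals mk)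
      PySem.Dict.empty
      (fun a _ => PySem.Dict.contains_empty a)
      (by simpa using (PySem.List.nodup_pyRange_one 0 (r + 1)).filter _)
  refine h2.trans ?_
  rw [show (PySem.Dict.empty : PySem.Dict Int Int).items = [] from rfl, List.nil_append]

theorem pvBest_eq (mk : Int) : ∀ (L : List (Int × Int)) (b : Int),
    L.foldl (fun best pv =>
      if PySem.Int.band (mk <<< (1 : Nat)) pv.1 == 0
          && PySem.Int.band (mk >>> (1 : Nat)) pv.1 == 0
          && best < pv.2 then pv.2
      else best) b
    = ((L.filter (fun pv => pvCompat mk pv.1)).map (fun pv => pv.2)).foldl max b := by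
  intro L
  induction L with
  | nil => intro b; rfl
  | cons p t ih =>
    intro b
    simp only [List.foldl_cons]
    rw [List.filter_cons]
    by_cases hc : pvCompat mk p.1 = true
    · have hc' : (PySem.Int.band (mk <<< (1 : Nat)) p.1 == 0
          && PySem.Int.band (mk >>> (1 : Nat)) p.1 == 0) = true := by
        unfold pvCompat at hc; exact hc
      rw [if_pos hc, hc', Bool.true_and]
      simp only [List.map_cons, List.foldl_cons]
      rw [ih]
      congr 1
      by_cases hb : b < p.2
      · rw [if_pos (by simpa using hb), max_eq_right (le_of_lt hb)]
      · rw [if_neg (by simpa using hb), max_eq_left (by omega)]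
    · have hc' : (PySem.Int.band (mk <<< (1 : Nat)) p.1 == 0
          && PySem.Int.band (mk >>> (1 : Nat)) p.1 == 0) = false := by
        unfold pvCompat at hc; simpa using hc
      rw [if_neg hc, hc', Bool.false_and]
      simpa using ih b

theorem pvBestB_g (rest : List Int) (vals : PySem.Dict Int Int)
    (hitems : vals.items = pvValsSpec rest) (mk : Int) (hmk : 0 ≤ mk) :
    pvBestB vals mk = pvG rest mk := by
  unfold pvBestB
  rw [hitems, pvBest_eq]
  cases rest with
  | nil => rfl
  | cons r' rest' =>
    simp only [pvValsSpec, pvG]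
    rw [List.filter_map, List.map_map, List.filter_filter]
    simp only [Function.comp_def]
    have hf : List.filter (fun a => pvCompat mk a && pvOk r' a) (PySem.List.pyRange 0 (r' + 1) 1)
        = List.filter (fun a => pvOk r' a && pvCompat a mk) (PySem.List.pyRange 0 (r' + 1) 1) := by
      apply List.filter_congr
      intro p hp
      have hp' : 0 ≤ p := (PySem.List.mem_pyRange_one.mp hp).1
      rw [pvCompat_symm mk p hmk hp', Bool.and_comm]
    rw [hf]

theorem pvVals_items : ∀ masks : List Int,
    (masks.reverse.foldl pvStepB PySem.Dict.empty).items = pvValsSpec masks := by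
  intro masks
  induction masks with
  | nil => rfl
  | cons r rest ih =>
    rw [List.reverse_cons, List.foldl_append]
    simp only [List.foldl_cons, List.foldl_nil]
    rw [pvStep_items]
    simp only [pvValsSpec]
    apply List.map_congr_left
    intro mk hmk
    have h0 : 0 ≤ mk := (PySem.List.mem_pyRange_one.mp (List.mem_filter.mp hmk).1).1
    rw [pvBestB_g rest _ ih mk h0]

-- ---- assembly ----

theorem pvRowMask_nonneg (n : Int) (row : List String) : 0 ≤ pvRowMaskA n row := by
  unfold pvRowMaskA
  have h : ∀ (L : List Int) (acc : Int), 0 ≤ acc →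
      0 ≤ L.foldl (fun mask j =>
        if PySem.List.pyGetD row j "" == "." then PySem.Int.bor mask ((1 : Int) <<< j.toNat)
        else mask) acc := by
    intro L
    induction L with
    | nil => intro acc h; simpa using h
    | cons j t ih =>
      intro acc hacc
      simp only [List.foldl_cons]
      apply ih
      split
      · rw [PySem.Int.bor_of_nonneg hacc (by rw [Int.shiftLeft_eq]; positivity)]
        positivity
      · exact hacc
  exact h _ 0 le_rfl

theorem pvMemoOK_empty (vr : List Int) : pvMemoOK vr PySem.Dict.empty := by
  intro i p v h
  simp [PySem.Dict.get?_empty] at h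

theorem pvFoldIfMax (L : List Int) (a : Int) :
    L.foldl (fun ans v => if ans < v then v else ans) a = L.foldl max a := by
  have hfun : (fun (ans v : Int) => if ans < v then v else ans) = max := by
    funext x v
    rw [max_def]
    split_ifs <;> omega
  rw [hfun]

theorem maxStudents1_eq (seats : List (List String)) (hne : seats ≠ []) :
    maxStudents1 seats = maxStudents1_alt seats := by
  unfold maxStudents1 maxStudents1_alt
  dsimp only
  have hrwB : pvRowMaskB = pvRowMaskA := rfl
  rw [hrwB]
  rw [PySem.List.foldl_append_singleton_eq_map, List.nil_append]
  -- A side: the memoized dfs computes pvG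
  have hlen : (seats.map (pvRowMaskA ((seats.headD []).length : Int))).length = seats.length :=
    List.length_map ..
  have hvr : ∀ x ∈ seats.map (pvRowMaskA ((seats.headD []).length : Int)), 0 ≤ x := by
    intro x hx
    obtain ⟨row, _, rfl⟩ := List.mem_map.mp hx
    exact pvRowMask_nonneg _ row
  have hA := pvDfs_ok ((seats.length : Int).toNat + 1)
      (seats.map (pvRowMaskA ((seats.headD []).length : Int))) 0 0 PySem.Dict.empty
      hvr le_rfl (by omega) (by omega) (pvMemoOK_empty _)
  rw [show ((seats.map (pvRowMaskA ((seats.headD []).length : Int))).length : Int)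
        = (seats.length : Int) by rw [hlen]] at hA
  rw [hA.1]
  rw [show (0 : Int).toNat = 0 from rfl, List.drop_zero]
  -- B side: the backward DP dictionary
  rw [show (PySem.Dict.values = fun d : PySem.Dict Int Int => d.items.map (fun p => p.2)) from rfl]
  dsimp only
  rw [pvVals_items, pvFoldIfMax]
  cases seats with
  | nil => exact absurd rfl hne
  | cons s0 t =>
    simp only [List.map_cons, pvValsSpec, List.map_map]
    simp only [pvG]
    have hproj : ((fun p : Int × Int => p.2) ∘ fun mk =>
        (mk, pvPC mk + pvG (t.map (pvRowMaskA (((s0 :: t).headD []).length : Int))) mk))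
        = fun mk => pvPC mk + pvG (t.map (pvRowMaskA (((s0 :: t).headD []).length : Int))) mk := by
      funext mk; rfl
    rw [hproj]
    congr 1
    apply congrArg
    apply List.filter_congr
    intro mk _
    simp [pvCompat, PySem.Int.band_zero]

-- ===== VERDICT (by name: the statement is the Claim_ definition above) =====
theorem maxStudents1_spec : Claim_equal_maxStudents1 := by
  intro seats _ hpre
  unfold Spec_maxStudents1
  exact maxStudents1_eq seats hpre.1
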